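-- pv_equiv track=rewrite | github.com/ldwoooo/BAEKJOON | WEEK10_분할정복_백트래킹_그리디/2630_색종이만들기.py | check
-- ===== SOURCE A (Python) =====
-- def check(arr):                     # 색종이를 판단하는 함수
--     for i in range(len(arr)):       # 2차배열에서 한줄씩 돌면서
--         if 0 in arr[i]:             # 해당 줄에 0이 들어있으면 멈춰
--             break
--     else:                           # break를 안만나고 나왔다면 == 0이 모든 줄에 없다
--         return 1
--
--     for i in range(len(arr)):
--         if 1 in arr[i]:             # 1이 들어있으면 멈춰
--             break
--     else:                           # 1이 모든 줄에 없으므로 0 반환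
--         return 0
-- ===== SOURCE B (Python) =====
-- def check(arr):
--     has_zero = has_one = False
--     for row in arr:
--         for c in row:
--             if c == 0:
--                 has_zero = True
--             elif c == 1:
--                 has_one = True
--     if not has_zero:
--         return 1
--     if not has_one:
--         return 0
-- ===== Notes on version B (the rewrite author's own statement) =====
-- stated objective: simpler
-- what changed: Replaced A's two separate short-circuiting row-membership scans with one combined pass over all cells that records has_zero/has_one flags, then decides.
import Mathlib
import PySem

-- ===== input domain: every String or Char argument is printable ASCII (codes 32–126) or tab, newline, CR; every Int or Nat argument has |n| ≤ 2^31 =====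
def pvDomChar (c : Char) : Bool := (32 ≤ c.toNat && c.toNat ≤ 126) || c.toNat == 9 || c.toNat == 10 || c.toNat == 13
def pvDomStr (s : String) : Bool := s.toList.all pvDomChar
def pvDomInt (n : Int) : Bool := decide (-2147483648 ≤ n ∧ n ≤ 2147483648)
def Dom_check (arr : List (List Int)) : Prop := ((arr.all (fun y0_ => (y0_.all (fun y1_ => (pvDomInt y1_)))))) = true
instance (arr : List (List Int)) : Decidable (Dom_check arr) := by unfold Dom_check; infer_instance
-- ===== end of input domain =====

-- B replaces A's two short-circuiting row-membership scans with one combined pass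
-- maintaining has_zero/has_one flags (simpler decomposition, same cost).


-- ===== PORT A =====
-- the first for/break/else loop: scan rows until one contains 0
def checkRowHas (v : Int) : List (List Int) → Bool
  | [] => false
  | r :: rs => if r.contains v then true else checkRowHas v rs

def check (arr : List (List Int)) : Option Int :=
  if checkRowHas 0 arr then
    -- broke out of the first loop; second loop
    if checkRowHas 1 arr then none else some 0
  else some 1

-- ===== PORT B =====
def check_alt (arr : List (List Int)) : Option Int :=
  let flags := arr.foldl
    (fun (p : Bool × Bool) row =>
      row.foldl (fun q c =>
        if c = 0 then (true, q.2) else if c = 1 then (q.1, true) else q) p)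
    (false, false)
  if !flags.1 then some 1 else if !flags.2 then some 0 else none

-- ===== PRECONDITION & SPEC =====
def Spec_check (arr : List (List Int)) (out : Option Int) : Prop := out = check_alt arr
instance (arr : List (List Int)) (out : Option Int) : Decidable (Spec_check arr out) := by unfold Spec_check; infer_instance

-- ===== CLAIM (what is proved, stated in full; the proofs are below) =====
def Claim_equal_check : Prop := ∀ (arr : List (List Int)), Dom_check arr → Spec_check arr (check arr)

-- ===== LEMMAS AND PROOFS =====
theorem inner_flags (row : List Int) (p : Bool × Bool) :
    row.foldl (fun q c => if c = 0 then (true, q.2) else if c = 1 then (q.1, true) else q) p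
      = (p.1 || row.contains 0, p.2 || row.contains 1) := by
  induction row generalizing p with
  | nil => simp
  | cons c cs ih =>
    rw [List.foldl_cons, ih]
    by_cases h0 : c = 0 <;> by_cases h1 : c = 1 <;>
      simp [h0, h1, eq_comm, Bool.or_assoc]

theorem outer_flags (arr : List (List Int)) (p : Bool × Bool) :
    arr.foldl
      (fun (p : Bool × Bool) row =>
        row.foldl (fun q c =>
          if c = 0 then (true, q.2) else if c = 1 then (q.1, true) else q) p)
      p = (p.1 || checkRowHas 0 arr, p.2 || checkRowHas 1 arr) := by
  induction arr generalizing p with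
  | nil => simp [checkRowHas]
  | cons r rs ih =>
    rw [List.foldl_cons, inner_flags, ih]
    simp [checkRowHas, Bool.or_assoc]

-- ===== VERDICT (by name: the statement is the Claim_ definition above) =====
theorem check_spec : Claim_equal_check := by
  intro arr _
  unfold Spec_check check check_alt
  simp only [outer_flags, Bool.false_or]
  by_cases h0 : checkRowHas 0 arr <;> by_cases h1 : checkRowHas 1 arr <;> simp [h0, h1]
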